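-- pv_equiv track=rewrite | github.com/vilobhmm/agents | projects/10_knowledge_graph/agent.py | parse_extraction
-- ===== SOURCE A (Python) =====
-- def parse_extraction(extraction: str) -> tuple:
--     """Parse extraction into structured data"""
--
--     # Simplified parsing
--     entities = []
--     relationships = []
--
--     lines = extraction.split("\n")
--     current_section = None
--
--     for line in lines:
--         line = line.strip()
--
--         if line.startswith("ENTITIES"):
--             current_section = "entities"
--         elif line.startswith("RELATIONSHIPS"):
--             current_section = "relationships"
--         elif line.startswith("-") and current_section == "entities":
--             # Parse entity
--             entity_text = line.strip("- ")
--             if "(" in entity_text: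
--                 name = entity_text.split("(")[0].strip()
--                 entity_type = (
--                     entity_text.split("Type:")[1].strip(")")
--                     if "Type:" in entity_text
--                     else "unknown"
--                 )
--                 entities.append({"name": name, "type": entity_type})
--         elif line.startswith("-") and current_section == "relationships":
--             # Parse relationship
--             if "->" in line:
--                 parts = line.strip("- ").split("->")
--                 if len(parts) >= 3:
--                     relationships.append(
--                         {
--                             "source": parts[0].strip(),
--                             "type": parts[1].strip(),
--                             "target": parts[2].strip(),
--                         }
--                     )
--
--     return entities, relationships
-- ===== SOURCE B (Python) =====
-- # B: segment-then-parse — strip all lines once, cut them into (header-kind, body)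
-- # segments with an index scanner, then build each output list by comprehension.
-- def _header(line):
--     if line.startswith("ENTITIES"):
--         return "entities"
--     if line.startswith("RELATIONSHIPS"):
--         return "relationships"
--     return None
--
--
-- def _segments(lines):
--     segs, i, n = [], 0, len(lines)
--     while i < n:
--         k = _header(lines[i])
--         i += 1
--         if k is None:
--             continue
--         body = []
--         while i < n and _header(lines[i]) is None:
--             body.append(lines[i])
--             i += 1
--         segs.append((k, body))
--     return segs
--
--
-- def _parse_entity(line):
--     text = line.strip("- ")
--     if line.startswith("-") and "(" in text:
--         name = text.split("(")[0].strip()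
--         etype = text.split("Type:")[1].strip(")") if "Type:" in text else "unknown"
--         return [{"name": name, "type": etype}]
--     return []
--
--
-- def _parse_rel(line):
--     if line.startswith("-") and "->" in line:
--         parts = line.strip("- ").split("->")
--         if len(parts) >= 3:
--             return [{"source": parts[0].strip(), "type": parts[1].strip(), "target": parts[2].strip()}]
--     return []
--
--
-- def parse_extraction(extraction: str) -> tuple:
--     lines = [l.strip() for l in extraction.split("\n")]
--     segs = _segments(lines)
--     entities = [e for k, body in segs if k == "entities" for l in body for e in _parse_entity(l)]
--     relationships = [r for k, body in segs if k != "entities" for l in body for r in _parse_rel(l)]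
--     return entities, relationships
-- ===== Notes on version B (the rewrite author's own statement) =====
-- stated objective: alternative
-- what changed: Replaced A's parse-while-scanning state machine by a staged pipeline: strip all lines up front, cut them into (header-kind, body) segments with an index scanner, then build each output list by a comprehension over the segments with dedicated per-line parsers.
import Mathlib
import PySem

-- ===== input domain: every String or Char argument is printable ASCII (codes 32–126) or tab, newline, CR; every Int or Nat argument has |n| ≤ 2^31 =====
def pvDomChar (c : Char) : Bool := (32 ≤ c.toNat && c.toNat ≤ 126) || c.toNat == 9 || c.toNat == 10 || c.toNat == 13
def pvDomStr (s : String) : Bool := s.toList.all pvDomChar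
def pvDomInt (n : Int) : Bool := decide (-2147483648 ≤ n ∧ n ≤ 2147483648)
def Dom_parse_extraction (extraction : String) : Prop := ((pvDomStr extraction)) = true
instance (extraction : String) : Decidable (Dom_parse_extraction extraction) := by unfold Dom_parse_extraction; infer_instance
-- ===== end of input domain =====

-- B replaces A's parse-while-scanning state machine by strip-all-lines, cut into
-- (header, body) segments, then parse each segment's body (alternative, same cost).

-- ===== PORT A =====
-- body of A's for-loop; state = (entities, relationships, current_section)
def pvStepA (st : (List (List (String × String))) × (List (List (String × String))) × Option String)
    (rawline : String) :
    (List (List (String × String))) × (List (List (String × String))) × Option String :=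
  let line := PySem.Str.strip rawline
  if PySem.Str.startswith line "ENTITIES" then (st.1, st.2.1, some "entities")
  else if PySem.Str.startswith line "RELATIONSHIPS" then (st.1, st.2.1, some "relationships")
  else if PySem.Str.startswith line "-" && st.2.2 == some "entities" then
    let entity_text := PySem.Str.stripChars line "- "
    if PySem.Str.isIn "(" entity_text then
      -- sep "(" resp. "Type:" is non-empty, so split? is `some`; parts[1] exists since "Type:" ∈ entity_text
      let name := PySem.Str.strip (((PySem.Str.split? entity_text "(").getD []).getD 0 "")
      let entity_type :=
        if PySem.Str.isIn "Type:" entity_text then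
          PySem.Str.stripChars (((PySem.Str.split? entity_text "Type:").getD []).getD 1 "") ")"
        else "unknown"
      (st.1 ++ [[("name", name), ("type", entity_type)]], st.2.1, st.2.2)
    else st
  else if PySem.Str.startswith line "-" && st.2.2 == some "relationships" then
    if PySem.Str.isIn "->" line then
      let parts := (PySem.Str.split? (PySem.Str.stripChars line "- ") "->").getD []   -- sep "->" ≠ "": exact
      if parts.length ≥ 3 then
        (st.1, st.2.1 ++ [[("source", PySem.Str.strip (parts.getD 0 "")),
                           ("type", PySem.Str.strip (parts.getD 1 "")),
                           ("target", PySem.Str.strip (parts.getD 2 ""))]], st.2.2)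
      else st
    else st
  else st

def parse_extraction (extraction : String) : (List (List (String × String))) × (List (List (String × String))) :=
  let lines := (PySem.Str.split? extraction "\n").getD []   -- sep "\n" ≠ "": exact
  let st := lines.foldl pvStepA ([], [], none)
  (st.1, st.2.1)

-- ===== PORT B =====
-- Source B _header
def pvHeader (line : String) : Option String :=
  if PySem.Str.startswith line "ENTITIES" then some "entities"
  else if PySem.Str.startswith line "RELATIONSHIPS" then some "relationships"
  else none

-- Source B _segments: cut the (already stripped) line list into (kind, body) segments
def pvSegments : List String → List (String × List String)
  | [] => []
  | l :: ls =>
    match pvHeader l with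
    | some k =>
        (k, ls.takeWhile (fun x => (pvHeader x).isNone)) ::
          pvSegments (ls.dropWhile (fun x => (pvHeader x).isNone))
    | none => pvSegments ls
  termination_by ls => ls.length
  decreasing_by
    · have := ls.length_dropWhile_le (fun x => (pvHeader x).isNone)
      simp; omega
    · simp

-- Source B _parse_entity
def pvEntityOf (line : String) : List (List (String × String)) :=
  let text := PySem.Str.stripChars line "- "
  if PySem.Str.startswith line "-" && PySem.Str.isIn "(" text then
    let name := PySem.Str.split? text "(" |>.getD [] |>.getD 0 "" |> PySem.Str.strip
    let etype :=
      if PySem.Str.isIn "Type:" text then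
        PySem.Str.stripChars (PySem.Str.split? text "Type:" |>.getD [] |>.getD 1 "") ")"
      else "unknown"
    [[("name", name), ("type", etype)]]
  else []

-- Source B _parse_rel
def pvRelOf (line : String) : List (List (String × String)) :=
  if PySem.Str.startswith line "-" && PySem.Str.isIn "->" line then
    let parts := PySem.Str.split? (PySem.Str.stripChars line "- ") "->" |>.getD []
    if parts.length ≥ 3 then
      [[("source", PySem.Str.strip (parts.getD 0 "")),
        ("type", PySem.Str.strip (parts.getD 1 "")),
        ("target", PySem.Str.strip (parts.getD 2 ""))]]
    else []
  else []

def parse_extraction_alt (extraction : String) : (List (List (String × String))) × (List (List (String × String))) :=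
  let lines := ((PySem.Str.split? extraction "\n").getD []).map PySem.Str.strip
  let segs := pvSegments lines
  (segs.flatMap (fun s => if s.1 == "entities" then s.2.flatMap pvEntityOf else []),
   segs.flatMap (fun s => if s.1 == "entities" then [] else s.2.flatMap pvRelOf))

-- ===== PRECONDITION & SPEC =====
def Spec_parse_extraction (extraction : String) (out : (List (List (String × String))) × (List (List (String × String)))) : Prop := out = parse_extraction_alt extraction
instance (extraction : String) (out : (List (List (String × String))) × (List (List (String × String)))) : Decidable (Spec_parse_extraction extraction out) := by unfold Spec_parse_extraction; infer_instance

-- ===== CLAIM (what is proved, stated in full; the proofs are below) =====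
def Claim_equal_parse_extraction : Prop := ∀ (extraction : String), Dom_parse_extraction extraction → Spec_parse_extraction extraction (parse_extraction extraction)

-- ===== LEMMAS AND PROOFS =====

-- reference state machine over ALREADY-STRIPPED lines (proof helper)
def pvRef : Option String → List String → (List (List (String × String))) × (List (List (String × String)))
  | _, [] => ([], [])
  | cur, l :: ls =>
    match pvHeader l with
    | some k => pvRef (some k) ls
    | none =>
      let rest := pvRef cur ls
      if cur == some "entities" then (pvEntityOf l ++ rest.1, rest.2)
      else if cur == some "relationships" then (rest.1, pvRelOf l ++ rest.2)
      else rest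

-- A's loop body, characterized via the header classifier and the two parsers
lemma pv_stepA_char (e r : List (List (String × String))) (cur : Option String) (l : String)
    (h : cur = none ∨ cur = some "entities" ∨ cur = some "relationships") :
    pvStepA (e, r, cur) l =
      match pvHeader (PySem.Str.strip l) with
      | some k => (e, r, some k)
      | none =>
        if cur == some "entities" then (e ++ pvEntityOf (PySem.Str.strip l), r, cur)
        else if cur == some "relationships" then (e, r ++ pvRelOf (PySem.Str.strip l), cur)
        else (e, r, cur) := by
  unfold pvStepA pvHeader pvEntityOf pvRelOf
  rcases h with h | h | h <;> subst h <;> dsimp only <;> split_ifs <;> simp_all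

-- A's fold equals the reference machine run on the stripped lines
lemma pv_foldA (lines : List String) :
    ∀ (e r : List (List (String × String))) (cur : Option String),
    cur = none ∨ cur = some "entities" ∨ cur = some "relationships" →
    (lines.foldl pvStepA (e, r, cur)).1 = e ++ (pvRef cur (lines.map PySem.Str.strip)).1 ∧
    (lines.foldl pvStepA (e, r, cur)).2.1 = r ++ (pvRef cur (lines.map PySem.Str.strip)).2 := by
  induction lines with
  | nil => intro e r cur _; simp [pvRef]
  | cons l ls ih =>
    intro e r cur h
    simp only [List.foldl_cons, List.map_cons]
    rw [pv_stepA_char e r cur l h]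
    cases hH : pvHeader (PySem.Str.strip l) with
    | some k =>
      have hk : k = "entities" ∨ k = "relationships" := by
        unfold pvHeader at hH; split_ifs at hH <;> simp_all
      have hinv : (some k : Option String) = none ∨ (some k : Option String) = some "entities" ∨
          (some k : Option String) = some "relationships" := by
        rcases hk with h' | h' <;> subst h' <;> simp
      simpa [pvRef, hH] using ih e r (some k) hinv
    | none =>
      rcases h with h | h | h <;> subst h
      · simpa [pvRef, hH] using ih e r none (Or.inl rfl)
      · obtain ⟨h1, h2⟩ := ih (e ++ pvEntityOf (PySem.Str.strip l)) r (some "entities")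
          (Or.inr (Or.inl rfl))
        refine ⟨?_, ?_⟩ <;> simp [pvRef, hH, h1, h2]
      · obtain ⟨h1, h2⟩ := ih e (r ++ pvRelOf (PySem.Str.strip l)) (some "relationships")
          (Or.inr (Or.inr rfl))
        refine ⟨?_, ?_⟩ <;> simp [pvRef, hH, h1, h2]

-- the reference machine ignores the incoming section at a dropWhile boundary
lemma pv_ref_drop (ls : List String) : ∀ (c c' : Option String),
    pvRef c (ls.dropWhile (fun x => (pvHeader x).isNone)) =
    pvRef c' (ls.dropWhile (fun x => (pvHeader x).isNone)) := by
  induction ls with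
  | nil => intro c c'; rfl
  | cons a t ih =>
    intro c c'
    by_cases ha : (pvHeader a).isNone
    · simp [ha, ih c c']
    · rcases Option.ne_none_iff_exists'.mp (by simpa using ha) with ⟨k, hk⟩
      simp [pvRef, hk]

-- running the reference machine through a header-free body parses the body
lemma pv_ref_body (k : String) (hk : k = "entities" ∨ k = "relationships") :
    ∀ (body rest : List String), (∀ x ∈ body, pvHeader x = none) →
    pvRef (some k) (body ++ rest) =
      ((if k == "entities" then body.flatMap pvEntityOf else []) ++ (pvRef (some k) rest).1,
       (if k == "entities" then [] else body.flatMap pvRelOf) ++ (pvRef (some k) rest).2) := by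
  intro body
  induction body with
  | nil => intro rest _; simp
  | cons b bs ih =>
    intro rest hb
    have hbnone : pvHeader b = none := hb b (by simp)
    have hbs : ∀ x ∈ bs, pvHeader x = none := fun x hx => hb x (by simp [hx])
    rcases hk with h | h <;> subst h <;>
      simp [pvRef, hbnone, ih rest hbs]

-- B's segment parse equals the reference machine started with no section
lemma pv_seg (L : List String) :
    ((pvSegments L).flatMap (fun s => if s.1 == "entities" then s.2.flatMap pvEntityOf else []),
     (pvSegments L).flatMap (fun s => if s.1 == "entities" then [] else s.2.flatMap pvRelOf)) =
    pvRef none L := by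
  induction L using pvSegments.induct with
  | case1 => simp [pvSegments, pvRef]
  | case2 l ls k hk ih =>
    have hkval : k = "entities" ∨ k = "relationships" := by
      unfold pvHeader at hk; split_ifs at hk <;> simp_all
    have hbody : ∀ x ∈ ls.takeWhile (fun x => (pvHeader x).isNone), pvHeader x = none := by
      intro x hx
      have := List.mem_takeWhile_imp hx
      simpa using this
    have hsplit : ls.takeWhile (fun x => (pvHeader x).isNone) ++
        ls.dropWhile (fun x => (pvHeader x).isNone) = ls := List.takeWhile_append_dropWhile ..
    have hrefl : pvRef none (l :: ls) = pvRef (some k) ls := by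
      simp [pvRef, hk]
    rw [hrefl, ← hsplit,
        pv_ref_body k hkval _ _ hbody,
        pv_ref_drop ls (some k) none, ← ih]
    rw [pvSegments]
    simp only [hk]
    rcases hkval with h | h <;> subst h <;> simp [List.flatMap_cons]
  | case3 l ls hk ih =>
    rw [pvSegments]
    simp only [hk]
    have h0 : pvRef none (l :: ls) = pvRef none ls := by simp [pvRef, hk]
    rw [h0, ← ih]

-- ===== VERDICT (by name: the statement is the Claim_ definition above) =====
theorem parse_extraction_spec : Claim_equal_parse_extraction := by
  intro extraction _
  unfold Spec_parse_extraction parse_extraction parse_extraction_alt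
  dsimp only
  rw [pv_seg]
  have h := pv_foldA ((PySem.Str.split? extraction "\n").getD []) [] [] none (Or.inl rfl)
  simp only [List.nil_append] at h
  exact Prod.ext h.1 h.2
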